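-- pv_equiv track=rewrite | github.com/himkt/problems.2019 | topcoder/SRM/0717/b.py | get
-- ===== SOURCE A (Python) =====
-- def get(s, t):
--     s = list(s)
--     t = list(t)
--     used = {t_i: False for t_i in t}
--
--     for i, t_i in enumerate(sorted(t, reverse=True)):
--         used = False
--
--         for j, s_j in enumerate(s):
--             if s_j < t_i and not used:
--                 s[j] = t_i
--                 used = True
--
--         if used:
--             continue
--
--     return ''.join(s)
-- ===== SOURCE B (Python) =====
-- def get(s, t):
--     # One merge-style pass: sort t descending once; the i-th largest t-char goes
--     # to the leftmost remaining position whose char is smaller, and those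
--     # positions are strictly left-to-right, so a single scan of s suffices.
--     ts = sorted(t, reverse=True)
--     out = []
--     i = 0
--     for c in s:
--         if i < len(ts) and c < ts[i]:
--             out.append(ts[i])
--             i += 1
--         else:
--             out.append(c)
--     return ''.join(out)
-- ===== Notes on version B (the rewrite author's own statement) =====
-- stated objective: faster
-- what changed: A rescans the whole of s from the left for every character of sorted(t); B exploits that the chosen positions are strictly left-to-right and does a single merge-style scan of s against sorted(t, reverse=True) with one advancing pointer.
import Mathlib
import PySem

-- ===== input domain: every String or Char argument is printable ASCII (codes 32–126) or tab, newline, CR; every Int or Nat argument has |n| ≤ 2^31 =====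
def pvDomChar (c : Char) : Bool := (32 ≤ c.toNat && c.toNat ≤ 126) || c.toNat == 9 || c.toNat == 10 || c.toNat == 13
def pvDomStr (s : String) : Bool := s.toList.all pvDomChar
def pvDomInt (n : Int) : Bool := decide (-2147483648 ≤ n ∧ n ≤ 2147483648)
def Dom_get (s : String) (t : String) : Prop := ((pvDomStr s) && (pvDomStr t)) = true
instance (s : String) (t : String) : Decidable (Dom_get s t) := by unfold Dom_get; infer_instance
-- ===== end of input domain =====

-- B replaces A's full rescan of s per t-character by one merge-style scan of s
-- against sorted(t, reverse=True) with an advancing pointer (objective: faster).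

-- ===== PORT A =====
-- inner loop: for j, s_j in enumerate(s): if s_j < t_i and not used: s[j] = t_i; used = True
def getInner (ti : Char) : List Char → Bool → List Char × Bool
  | [], u => ([], u)
  | c :: cs, u =>
    if c < ti ∧ u = false then
      let r := getInner ti cs true
      (ti :: r.1, r.2)
    else
      let r := getInner ti cs u
      (c :: r.1, r.2)

def get (s : String) (t : String) : String :=
  let sl := s.toList
  let tl := t.toList
  -- used = {t_i: False for t_i in t}  (immediately shadowed inside the loop; never read)
  let _used : PySem.Dict Char Bool := tl.foldl (fun d x => d.insert x false) PySem.Dict.empty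
  -- for i, t_i in enumerate(sorted(t, reverse=True)): used = False; <inner loop>; if used: continue
  let fin := (PySem.List.sorted tl (fun x => x) true).foldl
      (fun acc ti => (getInner ti acc false).1) sl
  String.ofList fin  -- ''.join(s)

-- ===== PORT B =====
def getAltStep (ts : List Char) (st : List Char × Nat) (c : Char) : List Char × Nat :=
  -- if i < len(ts) and c < ts[i]: out.append(ts[i]); i += 1 else: out.append(c)
  match ts[st.2]? with
  | some tc => if c < tc then (st.1 ++ [tc], st.2 + 1) else (st.1 ++ [c], st.2)
  | none => (st.1 ++ [c], st.2)

def get_alt (s : String) (t : String) : String :=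
  let ts := PySem.List.sorted t.toList (fun x => x) true
  let fin := s.toList.foldl (getAltStep ts) ([], 0)
  String.ofList fin.1  -- ''.join(out)

-- ===== PRECONDITION & SPEC =====
def Spec_get (s : String) (t : String) (out : String) : Prop := out = get_alt s t
instance (s : String) (t : String) (out : String) : Decidable (Spec_get s t out) := by unfold Spec_get; infer_instance

-- ===== CLAIM (what is proved, stated in full; the proofs are below) =====
def Claim_equal_get : Prop := ∀ (s : String) (t : String), Dom_get s t → Spec_get s t (get s t)

-- ===== LEMMAS AND PROOFS =====

-- A's outer fold, named for the proofs
def foldA (ts : List Char) (s : List Char) : List Char :=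
  ts.foldl (fun acc ti => (getInner ti acc false).1) s

-- the merge both formulations compute
def mergeB : List Char → List Char → List Char
  | [], _ => []
  | c :: cs, [] => c :: mergeB cs []
  | c :: cs, tc :: ts => if c < tc then tc :: mergeB cs ts else c :: mergeB cs (tc :: ts)

theorem getInner_true (ti : Char) (s : List Char) : getInner ti s true = (s, true) := by
  induction s with
  | nil => rfl
  | cons c cs ih => simp [getInner, ih]

theorem foldA_nil (ts : List Char) : foldA ts [] = [] := by
  induction ts with
  | nil => rfl
  | cons ti ts ih => simpa [foldA, getInner] using ih

theorem foldA_cons_ge (ts : List Char) (c : Char) (s : List Char)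
    (h : ∀ x ∈ ts, x ≤ c) : foldA ts (c :: s) = c :: foldA ts s := by
  induction ts generalizing s with
  | nil => rfl
  | cons ti ts ih =>
    have hti : ¬ c < ti := not_lt.mpr (h ti (by simp))
    have : getInner ti (c :: s) false = (c :: (getInner ti s false).1, (getInner ti s false).2) := by
      simp [getInner, hti]
    simp only [foldA, List.foldl_cons] at *
    rw [this]
    exact ih _ (fun x hx => h x (by simp [hx]))

theorem mergeB_nil (s : List Char) : mergeB s [] = s := by
  induction s with
  | nil => rfl
  | cons c cs ih => simp [mergeB, ih]

theorem foldA_eq_mergeB (ts : List Char) (hts : ts.Pairwise (fun a b => b ≤ a)) :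
    ∀ s, foldA ts s = mergeB s ts := by
  induction ts with
  | nil => intro s; simpa [foldA] using (mergeB_nil s).symm
  | cons ti ts ih =>
    rcases List.pairwise_cons.mp hts with ⟨hle, hp⟩
    intro s
    have step : ∀ s : List Char, foldA (ti :: ts) s = foldA ts (getInner ti s false).1 := by
      intro s; rfl
    induction s with
    | nil => rw [step]; simp [getInner, foldA_nil, mergeB]
    | cons c cs ihs =>
      rw [step]
      by_cases hc : c < ti
      · have : getInner ti (c :: cs) false = (ti :: cs, true) := by
          simp [getInner, hc, getInner_true]
        rw [this]
        have : foldA ts (ti :: cs) = ti :: foldA ts cs := foldA_cons_ge ts ti cs hle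
        rw [this, ih hp cs]
        simp [mergeB, hc]
      · have : getInner ti (c :: cs) false
            = (c :: (getInner ti cs false).1, (getInner ti cs false).2) := by
          simp [getInner, hc]
        rw [this]
        have hcge : ∀ x ∈ ts, x ≤ c := fun x hx => le_trans (hle x hx) (not_lt.mp hc)
        rw [foldA_cons_ge ts c _ hcge]
        rw [step] at ihs
        rw [ihs]
        simp [mergeB, hc]

theorem foldB_eq_mergeB (ts : List Char) :
    ∀ (s acc : List Char) (i : Nat),
      (s.foldl (getAltStep ts) (acc, i)).1 = acc ++ mergeB s (ts.drop i) := by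
  intro s
  induction s with
  | nil => intro acc i; simp [mergeB]
  | cons c cs ih =>
    intro acc i
    simp only [List.foldl_cons]
    cases hg : ts[i]? with
    | none =>
      have hd : ts.drop i = [] := by
        have := List.getElem?_eq_none_iff.mp hg
        exact List.drop_eq_nil_of_le this
      simp only [getAltStep, hg]
      rw [ih, hd]
      simp [mergeB]
    | some tc =>
      obtain ⟨hi, hval⟩ := List.getElem?_eq_some_iff.mp hg
      have hd : ts.drop i = tc :: ts.drop (i + 1) := by
        rw [List.drop_eq_getElem_cons hi, hval]
      simp only [getAltStep, hg]
      by_cases hc : c < tc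
      · simp only [hc, if_true]
        rw [ih, hd]
        simp [mergeB, hc]
      · simp only [hc, if_false]
        rw [ih, hd]
        simp [mergeB, hc]

-- ===== VERDICT (by name: the statement is the Claim_ definition above) =====
theorem get_spec : Claim_equal_get := by
  intro s t _
  unfold Spec_get _root_.get get_alt
  have hsorted := PySem.List.sorted_pairwise_rev (xs := t.toList) (key := fun x => x)
  have hA := foldA_eq_mergeB (PySem.List.sorted t.toList (fun x => x) true) hsorted s.toList
  have hB := foldB_eq_mergeB (PySem.List.sorted t.toList (fun x => x) true) s.toList [] 0
  simp only [List.drop_zero, List.nil_append] at hB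
  simp only [foldA] at hA
  simp only [hA, hB]
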